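-- pv_equiv track=rewrite | github.com/DIDONEproject/musif | musif/reports/tasks_DiskStation_Mar-25-1121-2021_Conflict.py | columns_alike_our_data
-- ===== SOURCE A (Python) =====
-- def columns_alike_our_data(third_columns_names, second_column_names, first_column_names=None):
--     columns = []
--     counter_first = 0
--     sub_counter_first = 0
--     counter_second = 0
--     sub_counter_second = 0
--     for c in third_columns_names:
--         if first_column_names:
--             cn = first_column_names[counter_first][0] + \
--                 second_column_names[counter_second][0] + c
--             sub_counter_first += 1
--             if sub_counter_first >= first_column_names[counter_first][1]:
--                 sub_counter_first = 0
--                 counter_first += 1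
--         else:
--             cn = second_column_names[counter_second][0] + c
--         sub_counter_second += 1
--         if sub_counter_second >= second_column_names[counter_second][1]:
--             sub_counter_second = 0
--             counter_second += 1
--         columns.append(cn)
--     return columns
-- ===== SOURCE B (Python) =====
-- def _expand_prefixes(pairs, limit):
--     # Flat list of prefixes: each (prefix, count) group occupies max(count, 1)
--     # consecutive slots; never build more than `limit` slots.
--     out = []
--     for p, n in pairs:
--         if len(out) >= limit:
--             break
--         out.extend([p] * min(max(n, 1), limit - len(out)))
--     return out
--
--
-- def columns_alike_our_data(third_columns_names, second_column_names, first_column_names=None):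
--     limit = len(third_columns_names)
--     exp_second = _expand_prefixes(second_column_names, limit)
--     if first_column_names:
--         exp_first = _expand_prefixes(first_column_names, limit)
--         return [a + b + c for a, b, c in zip(exp_first, exp_second, third_columns_names)]
--     return [b + c for b, c in zip(exp_second, third_columns_names)]
-- ===== Notes on version B (the rewrite author's own statement) =====
-- stated objective: simpler
-- what changed: Replaces A's four running counters with a one-shot flat expansion of each run-length list (each group to max(n,1) prefix copies, the number of columns A's counters consume per group) zipped against the third list.
import Mathlib
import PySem

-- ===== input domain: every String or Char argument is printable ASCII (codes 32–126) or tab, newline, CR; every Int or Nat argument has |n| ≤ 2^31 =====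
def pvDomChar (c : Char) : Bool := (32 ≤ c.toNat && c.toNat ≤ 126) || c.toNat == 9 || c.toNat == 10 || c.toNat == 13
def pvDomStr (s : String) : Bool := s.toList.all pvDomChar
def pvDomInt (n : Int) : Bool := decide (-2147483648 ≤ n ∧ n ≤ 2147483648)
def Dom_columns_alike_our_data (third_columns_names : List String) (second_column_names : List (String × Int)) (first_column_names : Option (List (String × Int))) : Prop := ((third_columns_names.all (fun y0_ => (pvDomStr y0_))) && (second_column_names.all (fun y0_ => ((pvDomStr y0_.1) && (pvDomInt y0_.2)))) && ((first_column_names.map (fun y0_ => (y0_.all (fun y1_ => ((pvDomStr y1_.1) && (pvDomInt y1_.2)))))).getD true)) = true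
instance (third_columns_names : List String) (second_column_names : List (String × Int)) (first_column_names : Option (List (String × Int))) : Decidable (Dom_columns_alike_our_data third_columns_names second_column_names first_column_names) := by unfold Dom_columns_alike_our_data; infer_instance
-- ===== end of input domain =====

-- B replaces A's four running counters with flat per-group prefix expansions zipped against the column list (simpler decomposition, same cost).


-- ===== PORT A =====
-- Out-of-range lookup defaults to ("", 0); unreachable under Pre_ (Python raises IndexError there).
def pvPairAt (l : List (String × Int)) (i : Int) : String × Int :=
  (PySem.List.pyGet? l i).getD ("", 0)

-- A's for-loop over third_columns_names with its four counters; useFirst is the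
-- loop-invariant truthiness of first_column_names, firstL its list (or []).
def pvALoop (firstL : List (String × Int)) (useFirst : Bool) (second : List (String × Int)) :
    List String → Int → Int → Int → Int → List String → List String
  | [], _, _, _, _, cols => cols
  | c :: rest, cf, sf, cs, ss, cols =>
    if useFirst then
      let cn := (pvPairAt firstL cf).1 ++ (pvPairAt second cs).1 ++ c
      let sf1 := sf + 1
      let sf2 := if sf1 ≥ (pvPairAt firstL cf).2 then 0 else sf1
      let cf2 := if sf1 ≥ (pvPairAt firstL cf).2 then cf + 1 else cf
      let ss1 := ss + 1
      let ss2 := if ss1 ≥ (pvPairAt second cs).2 then 0 else ss1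
      let cs2 := if ss1 ≥ (pvPairAt second cs).2 then cs + 1 else cs
      pvALoop firstL useFirst second rest cf2 sf2 cs2 ss2 (cols ++ [cn])
    else
      let cn := (pvPairAt second cs).1 ++ c
      let ss1 := ss + 1
      let ss2 := if ss1 ≥ (pvPairAt second cs).2 then 0 else ss1
      let cs2 := if ss1 ≥ (pvPairAt second cs).2 then cs + 1 else cs
      pvALoop firstL useFirst second rest cf sf cs2 ss2 (cols ++ [cn])

def columns_alike_our_data (third_columns_names : List String) (second_column_names : List (String × Int)) (first_column_names : Option (List (String × Int))) : List String :=
  match first_column_names with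
  | some (x :: xs) => pvALoop (x :: xs) true second_column_names third_columns_names 0 0 0 0 []
  | _ => pvALoop [] false second_column_names third_columns_names 0 0 0 0 []

-- ===== PORT B =====
-- B: expand the (prefix, count) pairs to a flat list of prefixes — max(count,1) slots
-- per group, never more than `limit` slots in all — then zip with the columns.
def pvExpandTo : List (String × Int) → Nat → List String
  | _, 0 => []
  | [], _ => []
  | (p, n) :: t, lim =>
      let k := min (max n 1).toNat lim
      List.replicate k p ++ pvExpandTo t (lim - k)

def columns_alike_our_data_alt (third_columns_names : List String) (second_column_names : List (String × Int)) (first_column_names : Option (List (String × Int))) : List String :=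
  let exp2 := pvExpandTo second_column_names third_columns_names.length
  match first_column_names with
  | none => (exp2.zip third_columns_names).map (fun t => t.1 ++ t.2)
  | some [] => (exp2.zip third_columns_names).map (fun t => t.1 ++ t.2)
  | some (x :: xs) =>
      let exp1 := pvExpandTo (x :: xs) third_columns_names.length
      (exp1.zip (exp2.zip third_columns_names)).map (fun t => t.1 ++ t.2.1 ++ t.2.2)

-- ===== PRECONDITION & SPEC =====
-- Total group capacity: group (p, n) covers max(n, 1) columns.
def pvCap (l : List (String × Int)) : Int := (l.map (fun pr => max pr.2 1)).sum

-- Pre_ excludes exactly the inputs where A raises IndexError: a third list longer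
-- than the group capacity of second_column_names (or of a truthy first_column_names).
def Pre_columns_alike_our_data (third_columns_names : List String) (second_column_names : List (String × Int)) (first_column_names : Option (List (String × Int))) : Prop :=
  ((third_columns_names.length : Int) ≤ pvCap second_column_names) ∧
  (first_column_names.getD [] ≠ [] → (third_columns_names.length : Int) ≤ pvCap (first_column_names.getD []))
instance (third_columns_names : List String) (second_column_names : List (String × Int)) (first_column_names : Option (List (String × Int))) : Decidable (Pre_columns_alike_our_data third_columns_names second_column_names first_column_names) := by unfold Pre_columns_alike_our_data; infer_instance

def pvWitness_columns_alike_our_data : List String × (List (String × Int)) × (Option (List (String × Int))) :=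
  (["a", "b", "c"], [("x", 2), ("y", 1)], some [("U", 3)])

def Spec_columns_alike_our_data (third_columns_names : List String) (second_column_names : List (String × Int)) (first_column_names : Option (List (String × Int))) (out : List String) : Prop := out = columns_alike_our_data_alt third_columns_names second_column_names first_column_names
instance (third_columns_names : List String) (second_column_names : List (String × Int)) (first_column_names : Option (List (String × Int))) (out : List String) : Decidable (Spec_columns_alike_our_data third_columns_names second_column_names first_column_names out) := by unfold Spec_columns_alike_our_data; infer_instance

-- ===== CLAIM (what is proved, stated in full; the proofs are below) =====
def Claim_equal_columns_alike_our_data : Prop := ∀ (third_columns_names : List String) (second_column_names : List (String × Int)) (first_column_names : Option (List (String × Int))), Dom_columns_alike_our_data third_columns_names second_column_names first_column_names → Pre_columns_alike_our_data third_columns_names second_column_names first_column_names → Spec_columns_alike_our_data third_columns_names second_column_names first_column_names (columns_alike_our_data third_columns_names second_column_names first_column_names)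

-- ===== LEMMAS AND PROOFS =====

-- Uncapped expansion (proof device): pvExpandTo is its `take`.
def pvExpand (l : List (String × Int)) : List String :=
  l.flatMap (fun pr => List.replicate (max pr.2 1).toNat pr.1)

lemma pvExpandTo_eq_take : ∀ (l : List (String × Int)) (lim : Nat),
    pvExpandTo l lim = (pvExpand l).take lim
  | [], 0 => by simp [pvExpandTo, pvExpand]
  | [], (_ + 1) => by simp [pvExpandTo, pvExpand]
  | (p, n) :: t, 0 => by simp [pvExpandTo, pvExpand]
  | (p, n) :: t, (lim + 1) => by
    rw [pvExpandTo]
    rw [pvExpandTo_eq_take t ((lim + 1) - min (max n 1).toNat (lim + 1))]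
    show List.replicate (min (max n 1).toNat (lim + 1)) p ++ _ = _
    conv_rhs => rw [pvExpand, List.flatMap_cons, ← pvExpand]
    rw [List.take_append, List.take_replicate, List.length_replicate]
    have hmin : min (lim + 1) (max n 1).toNat = min (max n 1).toNat (lim + 1) := Nat.min_comm _ _
    simp only [hmin]
    · congr 1
      congr 1
      omega
    · omega

lemma zip_take_of_le {α β : Type} : ∀ (xs : List α) (ys : List β) (n : Nat),
    ys.length ≤ n → (xs.take n).zip ys = xs.zip ys
  | [], _, _, _ => by simp
  | _ :: _, [], _, _ => by simp
  | x :: xs, y :: ys, n, h => by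
    cases n with
    | zero => simp at h
    | succ m =>
      simp [List.take_succ_cons, List.zip_cons_cons, zip_take_of_le xs ys m (by simpa using h)]

-- Remaining expansion of the suffix gs of a group list, with ss columns of the head group already consumed.
def pvRem (gs : List (String × Int)) (ss : Int) : List String :=
  match gs with
  | [] => []
  | (p, n) :: t => List.replicate ((max n 1).toNat - ss.toNat) p ++ pvExpand t

lemma pvRem_zero (gs : List (String × Int)) : pvRem gs 0 = pvExpand gs := by
  cases gs with
  | nil => simp [pvRem, pvExpand]
  | cons h t => cases h; simp [pvRem, pvExpand]

lemma pvCap_eq_length (l : List (String × Int)) : pvCap l = ((pvExpand l).length : Int) := by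
  induction l with
  | nil => simp [pvCap, pvExpand]
  | cons h t ih =>
    cases h with
    | mk p n =>
      simp [pvCap, pvExpand, List.sum_cons] at *
      omega

lemma pvPairAt_of_drop (l : List (String × Int)) (i : Int) (p : String) (n : Int)
    (t : List (String × Int)) (hi : 0 ≤ i) (hd : l.drop i.toNat = (p, n) :: t) :
    pvPairAt l i = (p, n) := by
  have h0 : (l.drop i.toNat)[0]? = some (p, n) := by rw [hd]; rfl
  have hg : l[i.toNat]? = some (p, n) := by
    rw [List.getElem?_drop] at h0; simpa using h0
  have : i = (i.toNat : Int) := by omega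
  rw [pvPairAt, this, PySem.List.pyGet?_natCast, hg]
  rfl

lemma pvALoop_false (firstL second : List (String × Int)) (cf sf : Int) :
    ∀ (third : List String) (gs : List (String × Int)) (cs ss : Int) (cols : List String),
    0 ≤ cs → second.drop cs.toNat = gs →
    0 ≤ ss → (∀ p n t, gs = (p, n) :: t → ss < max n 1) →
    (third.length : Int) ≤ ((pvRem gs ss).length : Int) →
    pvALoop firstL false second third cf sf cs ss cols
      = cols ++ ((pvRem gs ss).zip third).map (fun t => t.1 ++ t.2)
  | [], gs, cs, ss, cols, _, _, _, _, _ => by simp [pvALoop]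
  | c :: rest, gs, cs, ss, cols, hcs, hdrop, hss, hbnd, hlen => by
    match gs, hdrop with
    | [], _ => simp [pvRem] at hlen; omega
    | (p, n) :: t, hdrop =>
      have hlt : ss < max n 1 := hbnd p n t rfl
      have hget : pvPairAt second cs = (p, n) := pvPairAt_of_drop second cs p n t hcs hdrop
      have hmax1 : (1 : Int) ≤ max n 1 := le_max_right n 1
      have hk : (max n 1).toNat - ss.toNat = ((max n 1).toNat - ss.toNat - 1) + 1 := by omega
      have hrem : pvRem ((p, n) :: t) ss
          = p :: (List.replicate ((max n 1).toNat - ss.toNat - 1) p ++ pvExpand t) := by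
        rw [pvRem, hk, List.replicate_succ]; rfl
      have hdrop' : second.drop (cs + 1).toNat = t := by
        have : (cs + 1).toNat = cs.toNat + 1 := by omega
        rw [this, ← List.tail_drop, hdrop]; rfl
      simp only [pvALoop, if_neg (by simp : ¬ (false = true)), hget]
      by_cases hge : ss + 1 ≥ n
      · have hmaxeq : (max n 1).toNat = ss.toNat + 1 := by omega
        rw [if_pos hge, if_pos hge]
        rw [pvALoop_false firstL second cf sf rest t (cs + 1) 0 (cols ++ [p ++ c])
              (by omega) hdrop' (by omega)
              (fun q m u hu => by subst hu; have := le_max_right m 1; omega)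
              (by rw [pvRem_zero]
                  rw [hrem] at hlen
                  simp at hlen ⊢
                  omega)]
        rw [hrem, pvRem_zero]
        have : (max n 1).toNat - ss.toNat - 1 = 0 := by omega
        rw [this, List.replicate_zero, List.nil_append]
        simp
      · have hlt2 : ss + 1 < n := by omega
        rw [if_neg hge, if_neg hge]
        have hrem' : pvRem ((p, n) :: t) (ss + 1)
            = List.replicate ((max n 1).toNat - ss.toNat - 1) p ++ pvExpand t := by
          rw [pvRem]
          have h1' : (ss + 1).toNat = ss.toNat + 1 := by omega
          have h2' : (max n 1).toNat - (ss.toNat + 1) = (max n 1).toNat - ss.toNat - 1 := by omega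
          rw [h1', h2']
        rw [pvALoop_false firstL second cf sf rest ((p, n) :: t) cs (ss + 1) (cols ++ [p ++ c])
              hcs hdrop (by omega)
              (fun q m u hu => by
                have hq : q = p ∧ m = n := by
                  have := hu; cases this; exact ⟨rfl, rfl⟩
                omega)
              (by rw [hrem']
                  rw [hrem] at hlen
                  simp at hlen ⊢
                  omega)]
        rw [hrem, hrem']
        simp

lemma pvALoop_true (firstL second : List (String × Int)) :
    ∀ (third : List String) (gs1 gs2 : List (String × Int)) (cf sf cs ss : Int) (cols : List String),
    0 ≤ cf → firstL.drop cf.toNat = gs1 →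
    0 ≤ sf → (∀ p n t, gs1 = (p, n) :: t → sf < max n 1) →
    0 ≤ cs → second.drop cs.toNat = gs2 →
    0 ≤ ss → (∀ p n t, gs2 = (p, n) :: t → ss < max n 1) →
    (third.length : Int) ≤ ((pvRem gs1 sf).length : Int) →
    (third.length : Int) ≤ ((pvRem gs2 ss).length : Int) →
    pvALoop firstL true second third cf sf cs ss cols
      = cols ++ ((pvRem gs1 sf).zip ((pvRem gs2 ss).zip third)).map (fun t => t.1 ++ t.2.1 ++ t.2.2)
  | [], gs1, gs2, cf, sf, cs, ss, cols, _, _, _, _, _, _, _, _, _, _ => by simp [pvALoop]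
  | c :: rest, gs1, gs2, cf, sf, cs, ss, cols, hcf, hdrop1, hsf, hbnd1, hcs, hdrop2, hss, hbnd2, hlen1, hlen2 => by
    match gs1, gs2, hdrop1, hdrop2 with
    | [], _, _, _ => simp [pvRem] at hlen1; omega
    | (_ :: _), [], _, _ => simp [pvRem] at hlen2; omega
    | (p1, n1) :: t1, (p2, n2) :: t2, hdrop1, hdrop2 =>
      have hlt1 : sf < max n1 1 := hbnd1 p1 n1 t1 rfl
      have hlt2 : ss < max n2 1 := hbnd2 p2 n2 t2 rfl
      have hget1 : pvPairAt firstL cf = (p1, n1) := pvPairAt_of_drop firstL cf p1 n1 t1 hcf hdrop1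
      have hget2 : pvPairAt second cs = (p2, n2) := pvPairAt_of_drop second cs p2 n2 t2 hcs hdrop2
      have hm1 : (1 : Int) ≤ max n1 1 := le_max_right n1 1
      have hm2 : (1 : Int) ≤ max n2 1 := le_max_right n2 1
      have hk1 : (max n1 1).toNat - sf.toNat = ((max n1 1).toNat - sf.toNat - 1) + 1 := by omega
      have hk2 : (max n2 1).toNat - ss.toNat = ((max n2 1).toNat - ss.toNat - 1) + 1 := by omega
      have hrem1 : pvRem ((p1, n1) :: t1) sf
          = p1 :: (List.replicate ((max n1 1).toNat - sf.toNat - 1) p1 ++ pvExpand t1) := by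
        rw [pvRem, hk1, List.replicate_succ]; rfl
      have hrem2 : pvRem ((p2, n2) :: t2) ss
          = p2 :: (List.replicate ((max n2 1).toNat - ss.toNat - 1) p2 ++ pvExpand t2) := by
        rw [pvRem, hk2, List.replicate_succ]; rfl
      have hdrop1' : firstL.drop (cf + 1).toNat = t1 := by
        have : (cf + 1).toNat = cf.toNat + 1 := by omega
        rw [this, ← List.tail_drop, hdrop1]; rfl
      have hdrop2' : second.drop (cs + 1).toNat = t2 := by
        have : (cs + 1).toNat = cs.toNat + 1 := by omega
        rw [this, ← List.tail_drop, hdrop2]; rfl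
      have hlen1' : (rest.length : Int) + 1 ≤ ((pvRem ((p1,n1)::t1) sf).length : Int) := by
        simpa using hlen1
      have hlen2' : (rest.length : Int) + 1 ≤ ((pvRem ((p2,n2)::t2) ss).length : Int) := by
        simpa using hlen2
      simp only [pvALoop, hget1, hget2]
      have step : ∀ (nf1 nsf1 ns2 nss2 : Int) (g1 : List (String × Int)) (g2 : List (String × Int)),
          firstL.drop nf1.toNat = g1 → 0 ≤ nf1 → 0 ≤ nsf1 →
          (∀ p n t, g1 = (p, n) :: t → nsf1 < max n 1) →
          second.drop ns2.toNat = g2 → 0 ≤ ns2 → 0 ≤ nss2 →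
          (∀ p n t, g2 = (p, n) :: t → nss2 < max n 1) →
          pvRem ((p1,n1)::t1) sf = p1 :: pvRem g1 nsf1 →
          pvRem ((p2,n2)::t2) ss = p2 :: pvRem g2 nss2 →
          pvALoop firstL true second rest nf1 nsf1 ns2 nss2 (cols ++ [p1 ++ p2 ++ c])
            = cols ++ ((pvRem ((p1,n1)::t1) sf).zip ((pvRem ((p2,n2)::t2) ss).zip (c :: rest))).map
                (fun t => t.1 ++ t.2.1 ++ t.2.2) := by
        intro nf1 nsf1 ns2 nss2 g1 g2 hd1 h1 h2 hb1 hd2 h3 h4 hb2 he1 he2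
        rw [pvALoop_true firstL second rest g1 g2 nf1 nsf1 ns2 nss2 (cols ++ [p1 ++ p2 ++ c])
              h1 hd1 h2 hb1 h3 hd2 h4 hb2
              (by have := congrArg List.length he1; simp at this; omega)
              (by have := congrArg List.length he2; simp at this; omega)]
        rw [he1, he2]
        simp
      by_cases hge1 : sf + 1 ≥ n1 <;> by_cases hge2 : ss + 1 ≥ n2
      · rw [if_pos hge1, if_pos hge1, if_pos hge2, if_pos hge2]
        exact step (cf+1) 0 (cs+1) 0 t1 t2 hdrop1' (by omega) (by omega)
          (fun q m u hu => by subst hu; have := le_max_right m 1; omega)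
          hdrop2' (by omega) (by omega)
          (fun q m u hu => by subst hu; have := le_max_right m 1; omega)
          (by rw [hrem1, pvRem_zero]
              have : (max n1 1).toNat - sf.toNat - 1 = 0 := by omega
              rw [this, List.replicate_zero, List.nil_append])
          (by rw [hrem2, pvRem_zero]
              have : (max n2 1).toNat - ss.toNat - 1 = 0 := by omega
              rw [this, List.replicate_zero, List.nil_append])
      · rw [if_pos hge1, if_pos hge1, if_neg hge2, if_neg hge2]
        exact step (cf+1) 0 cs (ss+1) t1 ((p2,n2)::t2) hdrop1' (by omega) (by omega)
          (fun q m u hu => by subst hu; have := le_max_right m 1; omega)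
          hdrop2 hcs (by omega)
          (fun q m u hu => by cases hu; omega)
          (by rw [hrem1, pvRem_zero]
              have : (max n1 1).toNat - sf.toNat - 1 = 0 := by omega
              rw [this, List.replicate_zero, List.nil_append])
          (by rw [hrem2, pvRem]
              have ha : (ss + 1).toNat = ss.toNat + 1 := by omega
              have hb : (max n2 1).toNat - (ss.toNat + 1) = (max n2 1).toNat - ss.toNat - 1 := by omega
              rw [ha, hb])
      · rw [if_neg hge1, if_neg hge1, if_pos hge2, if_pos hge2]
        exact step cf (sf+1) (cs+1) 0 ((p1,n1)::t1) t2 hdrop1 hcf (by omega)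
          (fun q m u hu => by cases hu; omega)
          hdrop2' (by omega) (by omega)
          (fun q m u hu => by subst hu; have := le_max_right m 1; omega)
          (by rw [hrem1, pvRem]
              have ha : (sf + 1).toNat = sf.toNat + 1 := by omega
              have hb : (max n1 1).toNat - (sf.toNat + 1) = (max n1 1).toNat - sf.toNat - 1 := by omega
              rw [ha, hb])
          (by rw [hrem2, pvRem_zero]
              have : (max n2 1).toNat - ss.toNat - 1 = 0 := by omega
              rw [this, List.replicate_zero, List.nil_append])
      · rw [if_neg hge1, if_neg hge1, if_neg hge2, if_neg hge2]
        exact step cf (sf+1) cs (ss+1) ((p1,n1)::t1) ((p2,n2)::t2) hdrop1 hcf (by omega)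
          (fun q m u hu => by cases hu; omega)
          hdrop2 hcs (by omega)
          (fun q m u hu => by cases hu; omega)
          (by rw [hrem1, pvRem]
              have ha : (sf + 1).toNat = sf.toNat + 1 := by omega
              have hb : (max n1 1).toNat - (sf.toNat + 1) = (max n1 1).toNat - sf.toNat - 1 := by omega
              rw [ha, hb])
          (by rw [hrem2, pvRem]
              have ha : (ss + 1).toNat = ss.toNat + 1 := by omega
              have hb : (max n2 1).toNat - (ss.toNat + 1) = (max n2 1).toNat - ss.toNat - 1 := by omega
              rw [ha, hb])


-- ===== VERDICT (by name: the statement is the Claim_ definition above) =====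
theorem columns_alike_our_data_spec : Claim_equal_columns_alike_our_data := by
  intro third second first _ hpre
  obtain ⟨h2, h1⟩ := hpre
  unfold Spec_columns_alike_our_data
  have hb2 : (third.length : Int) ≤ ((pvRem second 0).length : Int) := by
    rw [pvRem_zero, ← pvCap_eq_length]; exact h2
  match first with
  | none =>
    rw [columns_alike_our_data, columns_alike_our_data_alt]
    simp only [pvExpandTo_eq_take]
    rw [zip_take_of_le _ third third.length le_rfl]
    rw [pvALoop_false [] second 0 0 third second 0 0 [] le_rfl (by simp) le_rfl
          (fun p n t ht => by have := le_max_right n 1; omega) hb2]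
    rw [pvRem_zero]
    all_goals simp
  | some [] =>
    rw [columns_alike_our_data, columns_alike_our_data_alt]
    simp only [pvExpandTo_eq_take]
    rw [zip_take_of_le _ third third.length le_rfl]
    rw [pvALoop_false [] second 0 0 third second 0 0 [] le_rfl (by simp) le_rfl
          (fun p n t ht => by have := le_max_right n 1; omega) hb2]
    rw [pvRem_zero]
    all_goals simp
  | some (x :: xs) =>
    have h1' : (third.length : Int) ≤ pvCap (x :: xs) := h1 (by simp)
    have hb1 : (third.length : Int) ≤ ((pvRem (x :: xs) 0).length : Int) := by
      rw [pvRem_zero, ← pvCap_eq_length]; exact h1'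
    rw [columns_alike_our_data, columns_alike_our_data_alt]
    simp only [pvExpandTo_eq_take]
    rw [zip_take_of_le _ third third.length le_rfl]
    rw [zip_take_of_le _ ((pvExpand second).zip third) third.length (by simp)]
    rw [pvALoop_true (x :: xs) second third (x :: xs) second 0 0 0 0 [] le_rfl (by simp) le_rfl
          (fun p n t ht => by have := le_max_right n 1; omega) le_rfl (by simp) le_rfl
          (fun p n t ht => by have := le_max_right n 1; omega) hb1 hb2]
    rw [pvRem_zero, pvRem_zero]
    all_goals simp
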